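-- pv_equiv track=rewrite | github.com/emersonrp/bindcontrol | Page/Mastermind.py | FindSmallestUniqueSubstring
-- ===== SOURCE A (Python) =====
-- def FindSmallestUniqueSubstring(names):
--     uniqueNames = [''] * len(names)
--     ### For each name
--     for nameInd, name in enumerate(names):
--         ### For each possible substring length
--         for windowSize in range(1,len(name)+1):
--             ### For each starting index of a substring
--             for substrInd in range(0, len(name)-windowSize+1):
--                 substr = name[substrInd:substrInd+windowSize].lower()
--                 foundMatch = False
--                 ### For each other name
--                 for otherNameInd in range(0, len(names)):
--                     if (nameInd != otherNameInd) and (names[otherNameInd].lower().find(substr) >= 0):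
--                         foundMatch = True
--                         break
--
--                 if not foundMatch:
--                     ### This substr works!
--                     uniqueNames[nameInd] = substr
--                     break
--             else:
--                 # continue if the inner loop did not break
--                 continue
--             # Inner loop broke, break again
--             break
--
--     return uniqueNames
-- ===== SOURCE B (Python) =====
-- def FindSmallestUniqueSubstring(names):
--     lowers = [name.lower() for name in names]
--     # one precomputation pass: every (lowercased) substring of every name, as a set per name
--     subs = [{low[k:k + w] for w in range(1, len(low) + 1) for k in range(len(low) - w + 1)}
--             for low in lowers]
--     result = []
--     for i, low in enumerate(lowers):
--         others = set()
--         for j, ss in enumerate(subs):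
--             if j != i:
--                 others |= ss
--         cands = (low[k:k + w] for w in range(1, len(low) + 1) for k in range(len(low) - w + 1))
--         result.append(next((s for s in cands if s not in others), ''))
--     return result
-- ===== Notes on version B (the rewrite author's own statement) =====
-- stated objective: alternative
-- what changed: B precomputes, in one pass, the set of all lowercased substrings of every name, then picks each name's answer as the first candidate (same length-then-start order, via a flat generator and next()) absent from the union of the other names' substring sets, replacing A's per-candidate break-driven scan over all other names with set membership.
import Mathlib
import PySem

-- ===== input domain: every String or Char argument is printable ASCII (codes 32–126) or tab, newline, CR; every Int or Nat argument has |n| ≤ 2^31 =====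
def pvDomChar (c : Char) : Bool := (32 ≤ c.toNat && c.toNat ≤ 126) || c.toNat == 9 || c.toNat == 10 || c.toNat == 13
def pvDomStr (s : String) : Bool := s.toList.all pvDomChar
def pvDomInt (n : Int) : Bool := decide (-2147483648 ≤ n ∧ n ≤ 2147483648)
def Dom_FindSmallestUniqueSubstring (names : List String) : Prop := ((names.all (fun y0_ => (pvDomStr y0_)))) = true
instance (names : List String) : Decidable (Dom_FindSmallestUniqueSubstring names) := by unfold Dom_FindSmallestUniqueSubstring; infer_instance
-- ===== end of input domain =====

-- B replaces A's per-candidate break-driven scan over the other names by a one-pass precomputation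
-- of every name's lowercased-substring set; same return value, objective: alternative (not faster).

-- ===== PORT A =====
-- inner loop over otherNameInd with break: true as soon as some other name contains sub
def pvA_found (names : List String) (i : Nat) (sub : List Char) : List Nat → Bool
  | [] => false
  | j :: rest =>
      if j ≠ i ∧ 0 ≤ PySem.Chars.find (PySem.Chars.lower (names.getD j "").toList) sub then true
      else pvA_found names i sub rest

-- loop over substrInd with break: first substring of width w with no match
-- (slice name[k:k+w] with 0 ≤ k, k+w ≤ len is exactly (drop k).take w)
def pvA_starts (names : List String) (i : Nat) (nameL : List Char) (w : Nat) : List Nat → Option (List Char)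
  | [] => none
  | k :: rest =>
      let sub := PySem.Chars.lower ((nameL.drop k).take w)
      if pvA_found names i sub (List.range names.length) then pvA_starts names i nameL w rest
      else some sub

-- loop over windowSize with for/else: keep '' unless some width yields a winner
def pvA_windows (names : List String) (i : Nat) (nameL : List Char) : List Nat → List Char
  | [] => []
  | wm :: rest =>
      match pvA_starts names i nameL (wm + 1) (List.range (nameL.length - (wm + 1) + 1)) with
      | some s => s
      | none => pvA_windows names i nameL rest

def FindSmallestUniqueSubstring (names : List String) : List String :=
  (List.range names.length).map (fun i =>
    String.ofList (pvA_windows names i (names.getD i "").toList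
      (List.range (names.getD i "").toList.length)))

-- ===== PORT B =====
-- all substrings of low in (length, start) order — B's flat candidate generator
def pvB_cands (low : List Char) : List (List Char) :=
  (List.range low.length).flatMap (fun wm =>
    (List.range (low.length - (wm + 1) + 1)).map (fun k => (low.drop k).take (wm + 1)))

def FindSmallestUniqueSubstring_alt (names : List String) : List String :=
  let lowers := names.map (fun n => PySem.Chars.lower n.toList)
  let subs := lowers.map (fun low => PySem.Set.ofList (pvB_cands low))
  (List.range lowers.length).map (fun i =>
    let others := (List.range subs.length).foldl
      (fun acc j => if j = i then acc else PySem.Set.union acc (subs.getD j [])) PySem.Set.empty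
    String.ofList (((pvB_cands (lowers.getD i [])).find?
      (fun s => !PySem.Set.contains others s)).getD []))

-- ===== PRECONDITION & SPEC =====
def Spec_FindSmallestUniqueSubstring (names : List String) (out : List String) : Prop := out = FindSmallestUniqueSubstring_alt names
instance (names : List String) (out : List String) : Decidable (Spec_FindSmallestUniqueSubstring names out) := by unfold Spec_FindSmallestUniqueSubstring; infer_instance

-- ===== CLAIM (what is proved, stated in full; the proofs are below) =====
def Claim_equal_FindSmallestUniqueSubstring : Prop := ∀ (names : List String), Dom_FindSmallestUniqueSubstring names → Spec_FindSmallestUniqueSubstring names (FindSmallestUniqueSubstring names)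


-- ===== LEMMAS AND PROOFS =====

-- the inner other-name loop of A is an existential over the index list
lemma pvA_found_iff (names : List String) (i : Nat) (sub : List Char) (js : List Nat) :
    pvA_found names i sub js = true ↔
      ∃ j ∈ js, j ≠ i ∧ 0 ≤ PySem.Chars.find (PySem.Chars.lower (names.getD j "").toList) sub := by
  induction js with
  | nil => simp [pvA_found]
  | cons j rest ih =>
    by_cases h : j ≠ i ∧ 0 ≤ PySem.Chars.find (PySem.Chars.lower (names.getD j "").toList) sub
    · simp only [pvA_found, if_pos h]
      exact ⟨fun _ => ⟨j, List.mem_cons_self, h⟩, fun _ => trivial⟩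
    · simp only [pvA_found, if_neg h, ih, List.mem_cons]
      constructor
      · rintro ⟨j', hj', hc⟩; exact ⟨j', Or.inr hj', hc⟩
      · rintro ⟨j', (rfl | hj'), hc⟩
        · exact absurd hc h
        · exact ⟨j', hj', hc⟩

-- A's break-driven start loop is find? over the mapped slice list
lemma pvA_starts_eq (names : List String) (i : Nat) (nameL : List Char) (w : Nat) (ks : List Nat) :
    pvA_starts names i nameL w ks =
      (ks.map (fun k => PySem.Chars.lower ((nameL.drop k).take w))).find?
        (fun s => !pvA_found names i s (List.range names.length)) := by
  induction ks with
  | nil => rfl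
  | cons k rest ih =>
    simp only [pvA_starts, List.map_cons, List.find?_cons]
    cases h : pvA_found names i (PySem.Chars.lower ((nameL.drop k).take w)) (List.range names.length) <;>
      simp [ih]

-- A's window loop is find? over the flattened candidate list, default ''
lemma pvA_windows_eq (names : List String) (i : Nat) (nameL : List Char) (ws : List Nat) :
    pvA_windows names i nameL ws =
      ((ws.flatMap (fun wm => (List.range (nameL.length - (wm + 1) + 1)).map
          (fun k => PySem.Chars.lower ((nameL.drop k).take (wm + 1))))).find?
        (fun s => !pvA_found names i s (List.range names.length))).getD [] := by
  induction ws with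
  | nil => rfl
  | cons wm rest ih =>
    simp only [pvA_windows, pvA_starts_eq, List.flatMap_cons, List.find?_append]
    cases h : (((List.range (nameL.length - (wm + 1) + 1)).map
        (fun k => PySem.Chars.lower ((nameL.drop k).take (wm + 1)))).find?
        (fun s => !pvA_found names i s (List.range names.length))) <;>
      simp [ih]

-- ASCII-irrelevant fact: lower is a character map, so it commutes with slicing
lemma pv_lower_slice (l : List Char) (k w : Nat) :
    PySem.Chars.lower ((l.drop k).take w) = ((PySem.Chars.lower l).drop k).take w := by
  simp [PySem.Chars.lower, List.map_take, List.map_drop]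

lemma pv_lower_length (l : List Char) : (PySem.Chars.lower l).length = l.length := by
  simp [PySem.Chars.lower]

-- A's flattened lowered-slice list is exactly B's candidate list of the lowered name
lemma pv_cands_eq (nameL : List Char) :
    (List.range nameL.length).flatMap (fun wm => (List.range (nameL.length - (wm + 1) + 1)).map
        (fun k => PySem.Chars.lower ((nameL.drop k).take (wm + 1)))) =
      pvB_cands (PySem.Chars.lower nameL) := by
  simp [pvB_cands, pv_lower_slice, pv_lower_length]

-- B's candidate list holds exactly the nonempty infixes
lemma pv_mem_cands (low s : List Char) : s ∈ pvB_cands low ↔ s ≠ [] ∧ s <:+: low := by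
  constructor
  · intro hm
    simp only [pvB_cands, List.mem_flatMap, List.mem_range, List.mem_map] at hm
    obtain ⟨wm, hwm, k, hk, rfl⟩ := hm
    refine ⟨?_, ((List.take_prefix _ _).isInfix).trans ((List.drop_suffix k low).isInfix)⟩
    intro h
    have := congrArg List.length h
    simp [List.length_take, List.length_drop] at this
    omega
  · rintro ⟨hne, t1, t2, rfl⟩
    simp only [pvB_cands, List.mem_flatMap, List.mem_range, List.mem_map]
    have hs : 1 ≤ s.length := by
      cases s with
      | nil => exact absurd rfl hne
      | cons a t => simp
    refine ⟨s.length - 1, by simp [List.length_append]; omega,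
            t1.length, by simp [List.length_append]; omega, ?_⟩
    have hw : s.length - 1 + 1 = s.length := by omega
    rw [hw]
    rw [show t1 ++ s ++ t2 = t1 ++ (s ++ t2) by simp]
    rw [List.drop_left, List.take_left]

-- membership in B's union-of-others fold
lemma pv_mem_foldl_union {α : Type} [BEq α] [LawfulBEq α] (f : Nat → PySem.Set α) (i : Nat)
    (js : List Nat) (acc : PySem.Set α) (x : α) :
    x ∈ js.foldl (fun acc j => if j = i then acc else PySem.Set.union acc (f j)) acc ↔
      x ∈ acc ∨ ∃ j ∈ js, j ≠ i ∧ x ∈ f j := by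
  induction js generalizing acc with
  | nil => simp
  | cons j rest ih =>
    simp only [List.foldl_cons]
    by_cases h : j = i
    · subst h
      simp only [ih, List.mem_cons]
      constructor
      · rintro (hx | ⟨j', hj', hne, hf⟩)
        · exact Or.inl hx
        · exact Or.inr ⟨j', Or.inr hj', hne, hf⟩
      · rintro (hx | ⟨j', (rfl | hj'), hne, hf⟩)
        · exact Or.inl hx
        · exact absurd rfl hne
        · exact Or.inr ⟨j', hj', hne, hf⟩
    · simp only [if_neg h, ih, PySem.Set.mem_union, List.mem_cons]
      constructor
      · rintro (⟨hx | hf⟩ | ⟨j', hj', hne, hf⟩)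
        · exact Or.inl hx
        · exact Or.inr ⟨j, Or.inl rfl, h, hf⟩
        · exact Or.inr ⟨j', Or.inr hj', hne, hf⟩
      · rintro (hx | ⟨j', (rfl | hj'), hne, hf⟩)
        · exact Or.inl (Or.inl hx)
        · exact Or.inl (Or.inr hf)
        · exact Or.inr ⟨j', hj', hne, hf⟩

-- getD through the lowering map (both defaults lower to [])
lemma pv_lowers_getD (names : List String) (j : Nat) :
    (names.map (fun n => PySem.Chars.lower n.toList)).getD j [] =
      PySem.Chars.lower (names.getD j "").toList := by
  simp only [List.getD_eq_getElem?_getD, List.getElem?_map]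
  cases h : names[j]? <;> simp [PySem.Chars.lower]

-- getD through the substring-set map (both defaults give the empty set)
lemma pv_subs_getD (lowers : List (List Char)) (j : Nat) :
    (lowers.map (fun low => PySem.Set.ofList (pvB_cands low))).getD j [] =
      PySem.Set.ofList (pvB_cands (lowers.getD j [])) := by
  simp only [List.getD_eq_getElem?_getD, List.getElem?_map]
  cases h : lowers[j]? <;> simp [pvB_cands, PySem.Set.ofList]

-- find? only looks at members, so predicates may be exchanged memberwise
lemma pv_find?_congr {α : Type} (l : List α) (p q : α → Bool) (h : ∀ x ∈ l, p x = q x) :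
    l.find? p = l.find? q := by
  induction l with
  | nil => rfl
  | cons a t ih =>
    simp only [List.find?_cons, h a (List.mem_cons_self), ih (fun x hx => h x (List.mem_cons_of_mem a hx))]

-- ===== VERDICT (by name: the statement is the Claim_ definition above) =====
theorem FindSmallestUniqueSubstring_spec : Claim_equal_FindSmallestUniqueSubstring := by
  unfold Claim_equal_FindSmallestUniqueSubstring Spec_FindSmallestUniqueSubstring
  intro names _
  unfold FindSmallestUniqueSubstring FindSmallestUniqueSubstring_alt
  simp only [List.length_map]
  refine List.map_congr_left ?_
  intro i hi
  rw [List.mem_range] at hi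
  congr 1
  rw [pvA_windows_eq, pv_cands_eq, pv_lowers_getD]
  congr 1
  apply pv_find?_congr
  intro s hs
  rw [pv_mem_cands] at hs
  obtain ⟨hne, _⟩ := hs
  have hc : ∀ (t : PySem.Set (List Char)), PySem.Set.contains t s = true ↔ s ∈ t := fun t => by
    simp [PySem.Set.contains]
  rw [Bool.eq_iff_iff, Bool.not_eq_true', Bool.not_eq_true', Bool.eq_false_iff, Bool.eq_false_iff,
    Ne, Ne, pvA_found_iff, hc]
  apply not_congr
  rw [pv_mem_foldl_union (f := fun j => ((names.map (fun n => PySem.Chars.lower n.toList)).map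
      (fun low => PySem.Set.ofList (pvB_cands low))).getD j [])]
  simp only [PySem.Set.empty, List.not_mem_nil, false_or, List.mem_range]
  constructor
  · rintro ⟨j, hj, hne', hf⟩
    refine ⟨j, hj, hne', ?_⟩
    rw [pv_subs_getD, PySem.Set.mem_ofList, pv_mem_cands, pv_lowers_getD]
    exact ⟨hne, (PySem.Chars.find_nonneg_iff _ _).1 hf⟩
  · rintro ⟨j, hj, hne', hf⟩
    rw [pv_subs_getD, PySem.Set.mem_ofList, pv_mem_cands, pv_lowers_getD] at hf
    exact ⟨j, hj, hne', (PySem.Chars.find_nonneg_iff _ _).2 hf.2⟩
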